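-- pv_equiv track=rewrite | github.com/dplocki/aquaQ-challenge | solutions/challenge33.py | solution
-- ===== SOURCE A (Python) =====
-- def solution(requested_score: int) -> int:
--     points_possibilities = [1, 2, 3, 4, 5, 6, 7, 8, 9, 10, 11, 12, 13, 14, 15, 16, 17, 18, 19, 20, 21, 22, 24, 25, 26, 27, 28, 30, 32, 33, 34, 36, 38, 39, 40, 42, 45, 48, 50, 51, 54, 57, 60]
--     cache = [0]
--
--     for score in range(1, requested_score + 1):
--         cache.append(min(
--             1 + cache[score - points_possibility]
--             for points_possibility in points_possibilities
--             if score - points_possibility >= 0))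
--
--     return sum(cache)
-- ===== SOURCE B (Python) =====
-- # B: O(1) closed form. The min-darts function f satisfies f(s) = f(s-60) + 1 for all
-- # s >= 108 (the 43 dart values all lie in [1,60] and 60 is itself a value), so the
-- # prefix sum is: a table lookup below 108, and table + arithmetic-series tail above.
--
-- # f(0..107), the minimum number of darts for each score (precomputed once).
-- _DARTS = [0, 1, 1, 1, 1, 1, 1, 1, 1, 1, 1, 1, 1, 1, 1, 1, 1, 1, 1, 1, 1, 1, 1, 2,
--           1, 1, 1, 1, 1, 2, 1, 2, 1, 1, 1, 2, 1, 2, 1, 1, 1, 2, 1, 2, 2, 1, 2, 2,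
--           1, 2, 1, 1, 2, 2, 1, 2, 2, 1, 2, 2, 1, 2, 2, 2, 2, 2, 2, 2, 2, 2, 2, 2,
--           2, 2, 2, 2, 2, 2, 2, 2, 2, 2, 2, 2, 2, 2, 2, 2, 2, 2, 2, 2, 2, 2, 2, 2,
--           2, 2, 2, 2, 2, 2, 2, 3, 2, 2, 3, 2]
--
-- # _PREF[s]  = sum(f(0..s))                       for 0 <= s <= 107
-- # _P[r]     = sum(f(0..107+r))                   for 0 <= r < 60
-- # _W[r]     = sum(f(48+r..107+r)), one period    for 0 <= r < 60
-- _PREF = []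
-- _acc = 0
-- for _v in _DARTS:
--     _acc += _v
--     _PREF.append(_acc)
-- _EXT = list(_DARTS)
-- for _s in range(108, 168):
--     _EXT.append(_EXT[_s - 60] + 1)
-- _P = []
-- _W = []
-- for _r in range(60):
--     _P.append(_PREF[107] + sum(_EXT[108:108 + _r]))
--     _W.append(sum(_EXT[48 + _r:108 + _r]))
--
--
-- def solution(requested_score: int) -> int:
--     n = requested_score
--     if n < 0:
--         return 0
--     if n < 108:
--         return _PREF[n]
--     q, r = divmod(n - 107, 60)
--     # sum(f(0..107+r)) + q shifted copies of one 60-wide window, each shift adding 60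
--     return _P[r] + q * _W[r] + 30 * q * (q + 1)
-- ===== Notes on version B (the rewrite author's own statement) =====
-- stated objective: faster
-- what changed: Replaces the O(n) dynamic program (43-way min per score over a growing cache, then summing it) with an O(1) closed form: the min-darts function satisfies f(s)=f(s-60)+1 for all s>=108, so the answer is a table lookup below 108 and table value + q*window + 30*q*(q+1) above.
import Mathlib
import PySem

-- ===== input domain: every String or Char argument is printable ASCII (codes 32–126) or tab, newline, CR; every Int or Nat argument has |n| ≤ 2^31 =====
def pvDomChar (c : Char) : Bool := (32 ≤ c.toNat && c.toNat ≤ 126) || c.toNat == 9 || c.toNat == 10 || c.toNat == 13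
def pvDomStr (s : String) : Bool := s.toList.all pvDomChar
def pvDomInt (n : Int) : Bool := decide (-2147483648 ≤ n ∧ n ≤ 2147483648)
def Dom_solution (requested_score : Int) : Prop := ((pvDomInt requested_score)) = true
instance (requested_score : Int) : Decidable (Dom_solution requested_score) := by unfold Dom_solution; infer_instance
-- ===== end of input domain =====

-- B replaces A's O(n) dynamic program with an O(1) closed form based on the
-- eventual period-60 linearity of the min-darts function (f(s) = f(s-60) + 1 for s ≥ 108).

-- ===== PORT A =====
def pointsPossibilities : List Int :=
  [1, 2, 3, 4, 5, 6, 7, 8, 9, 10, 11, 12, 13, 14, 15, 16, 17, 18, 19, 20, 21, 22, 24, 25,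
   26, 27, 28, 30, 32, 33, 34, 36, 38, 39, 40, 42, 45, 48, 50, 51, 54, 57, 60]

-- Python's min(generator) and cache[...] never fail here (the value 1 always qualifies and
-- the index score - p is always in range), so the .getD defaults are never used.
def solution (requested_score : Int) : Int :=
  let cache :=
    (PySem.List.pyRange 1 (requested_score + 1) 1).foldl
      (fun cache score =>
        cache ++ [(PySem.List.min?
            (pointsPossibilities.filterMap (fun p =>
              if score - p ≥ 0 then
                some (1 + (PySem.List.pyGet? cache (score - p)).getD 0)
              else none))
            (fun x => x)).getD 0])
      [0]
  cache.sum

-- ===== PORT B =====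
-- f(0..107): minimum number of darts for each score (precomputed constants)
def dartsTable : List Int :=
  [0, 1, 1, 1, 1, 1, 1, 1, 1, 1, 1, 1, 1, 1, 1, 1, 1, 1, 1, 1, 1, 1, 1, 2,
   1, 1, 1, 1, 1, 2, 1, 2, 1, 1, 1, 2, 1, 2, 1, 1, 1, 2, 1, 2, 2, 1, 2, 2,
   1, 2, 1, 1, 2, 2, 1, 2, 2, 1, 2, 2, 1, 2, 2, 2, 2, 2, 2, 2, 2, 2, 2, 2,
   2, 2, 2, 2, 2, 2, 2, 2, 2, 2, 2, 2, 2, 2, 2, 2, 2, 2, 2, 2, 2, 2, 2, 2,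
   2, 2, 2, 2, 2, 2, 2, 3, 2, 2, 3, 2]

-- _PREF: running prefix sums of dartsTable
def prefTable : List Int :=
  (dartsTable.foldl (fun (st : List Int × Int) v => (st.1 ++ [st.2 + v], st.2 + v)) ([], 0)).1

-- _EXT: dartsTable extended to scores 0..167 by f(s) = f(s-60) + 1
def extTable : List Int :=
  (PySem.List.pyRange 108 168 1).foldl
    (fun ext s => ext ++ [(PySem.List.pyGet? ext (s - 60)).getD 0 + 1]) dartsTable

-- _P[r] = sum(f(0..107+r)), _W[r] = sum(f(48+r..107+r)) for 0 ≤ r < 60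
def pTable : List Int :=
  (PySem.List.pyRange 0 60 1).foldl
    (fun p r => p ++ [(PySem.List.pyGet? prefTable 107).getD 0 +
      (PySem.List.slice extTable (some 108) (some (108 + r))).sum]) []

def wTable : List Int :=
  (PySem.List.pyRange 0 60 1).foldl
    (fun w r => w ++ [(PySem.List.slice extTable (some (48 + r)) (some (108 + r))).sum]) []

def solution_alt (requested_score : Int) : Int :=
  let n := requested_score
  if n < 0 then 0
  else if n < 108 then (PySem.List.pyGet? prefTable n).getD 0
  else
    let qr := (PySem.Int.divmod? (n - 107) 60).getD (0, 0)
    (PySem.List.pyGet? pTable qr.2).getD 0 + qr.1 * (PySem.List.pyGet? wTable qr.2).getD 0 +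
      30 * qr.1 * (qr.1 + 1)

-- ===== PRECONDITION & SPEC =====
def Spec_solution (requested_score : Int) (out : Int) : Prop := out = solution_alt requested_score
instance (requested_score : Int) (out : Int) : Decidable (Spec_solution requested_score out) := by unfold Spec_solution; infer_instance

-- ===== CLAIM (what is proved, stated in full; the proofs are below) =====
def Claim_equal_solution : Prop := ∀ (requested_score : Int), Dom_solution requested_score → Spec_solution requested_score (solution requested_score)

-- ===== LEMMAS AND PROOFS =====

-- Nat-indexed model of the dynamic program, cache kept in REVERSED order (head = latest)
def coinsN : List Nat :=
  [1, 2, 3, 4, 5, 6, 7, 8, 9, 10, 11, 12, 13, 14, 15, 16, 17, 18, 19, 20, 21, 22, 24, 25,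
   26, 27, 28, 30, 32, 33, 34, 36, 38, 39, 40, 42, 45, 48, 50, 51, 54, 57, 60]

def Frev : Nat → List Int
  | 0 => [0]
  | m + 1 => (PySem.List.min? (coinsN.filterMap (fun p =>
      if p ≤ m + 1 then some (1 + (Frev m).getD (p - 1) 0) else none)) (fun x => x)).getD 0
      :: Frev m

def g (s : Nat) : Int := (Frev s).getD 0 0

def candsG (s : Nat) : List Int :=
  coinsN.filterMap (fun p => if p ≤ s then some (1 + g (s - p)) else none)

-- prefix sums of the extended table: T m = sum of f(0..m-1)
def T (m : Nat) : Int := (extTable.take m).sum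

theorem coins_bounds : ∀ p ∈ coinsN, 1 ≤ p ∧ p ≤ 60 := by decide

theorem lenFrev (m : Nat) : (Frev m).length = m + 1 := by
  induction m with
  | zero => rfl
  | succ m ih => simp [Frev, ih]

theorem stab (s m : Nat) (h : s ≤ m) : (Frev m).getD (m - s) 0 = g s := by
  induction m with
  | zero => interval_cases s; rfl
  | succ m ih =>
      rcases Nat.eq_or_lt_of_le h with h1 | h1
      · subst h1; simp [g]
      · have hs : s ≤ m := by omega
        have : m + 1 - s = (m - s) + 1 := by omega
        rw [this]
        show (Frev (m+1)).getD ((m - s) + 1) 0 = g s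
        rw [Frev]
        simpa using ih hs

theorem g_succ (m : Nat) :
    g (m + 1) = (PySem.List.min? (candsG (m + 1)) (fun x => x)).getD 0 := by
  show (Frev (m+1)).getD 0 0 = _
  rw [Frev]
  simp only [List.getD_cons_zero]
  have hfm : (coinsN.filterMap (fun p =>
      if p ≤ m + 1 then some (1 + (Frev m).getD (p - 1) 0) else none)) = candsG (m + 1) := by
    unfold candsG
    apply List.filterMap_congr
    intro p hp
    rcases coins_bounds p hp with ⟨hp1, hp60⟩
    by_cases hc : p ≤ m + 1
    · simp only [if_pos hc]
      have hle : m + 1 - p ≤ m := by omega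
      have : m - (m + 1 - p) = p - 1 := by omega
      rw [← stab (m + 1 - p) m hle, this]
    · simp [hc]
  rw [hfm]

-- A's cache after the first m loop iterations is (Frev m).reverse
theorem rev_getD (l : List Int) (i : Nat) (h : i < l.length) :
    l.reverse.getD i 0 = l.getD (l.length - 1 - i) 0 := by
  rw [List.getD_eq_getElem _ _ (by simpa using h), List.getD_eq_getElem _ _ (by omega)]
  simp [List.getElem_reverse]

set_option maxRecDepth 40000 in
set_option maxHeartbeats 1000000 in
theorem points_cast : pointsPossibilities = coinsN.map (fun p => (p : Int)) := by decide

theorem fm_cast (f : Int → Option Int) :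
    pointsPossibilities.filterMap f = coinsN.filterMap (fun p => f ((p : Nat) : Int)) := by
  rw [points_cast, List.filterMap_map]
  rfl

theorem invA (m : Nat) :
    (PySem.List.pyRange 1 ((m : Int) + 1) 1).foldl
      (fun cache score =>
        cache ++ [(PySem.List.min?
            (pointsPossibilities.filterMap (fun p =>
              if score - p ≥ 0 then
                some (1 + (PySem.List.pyGet? cache (score - p)).getD 0)
              else none))
            (fun x => x)).getD 0])
      [0] = (Frev m).reverse := by
  induction m with
  | zero => simp [PySem.List.pyRange_one_eq_nil, Frev]
  | succ m ih =>
      have hsplit : PySem.List.pyRange 1 ((((m : Nat) + 1) : Int) + 1) 1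
          = PySem.List.pyRange 1 ((m : Int) + 1) 1 ++ [((m : Nat) + 1 : Int)] := by
        have := PySem.List.pyRange_one_succ_right (a := 1) (b := (m : Int) + 1) (by omega)
        push_cast at this
        convert this using 3
      push_cast
      rw [hsplit, List.foldl_append, ih]
      simp only [List.foldl_cons, List.foldl_nil]
      rw [Frev]
      rw [List.reverse_cons]
      congr 2
      rw [fm_cast]
      refine congrArg (fun l => (PySem.List.min? l fun x => x).getD 0) ?_
      apply List.filterMap_congr
      intro p hp
      rcases coins_bounds p hp with ⟨hp1, hp60⟩
      by_cases hc : p ≤ m + 1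
      · have hge : ((m : Nat) + 1 : Int) - (p : Int) ≥ 0 := by omega
        have hidx : ((m : Nat) + 1 : Int) - (p : Int) = (((m + 1 - p : Nat)) : Int) := by
          omega
        rw [if_pos hge, if_pos hc, hidx, PySem.List.pyGet?_natCast]
        congr 2
        rw [← List.getD_eq_getElem?_getD, rev_getD (Frev m) _ (by simp [lenFrev]; omega)]
        simp only [lenFrev]
        congr 1
        omega
      · have : ¬ (((m : Nat) + 1 : Int) - (p : Int) ≥ 0) := by omega
        rw [if_neg this, if_neg hc]

theorem solution_eq (n : Int) (hn : 0 ≤ n) : solution n = (Frev n.toNat).reverse.sum := by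
  unfold solution
  have : n + 1 = ((n.toNat : Int)) + 1 := by omega
  rw [this, invA]

set_option maxRecDepth 100000 in
set_option maxHeartbeats 4000000 in
theorem ext_eq : (Frev 167).reverse = extTable := by decide

set_option maxRecDepth 40000 in
set_option maxHeartbeats 1000000 in
theorem len_ext : extTable.length = 168 := by decide

theorem g_ext (s : Nat) (h : s ≤ 167) : g s = extTable.getD s 0 := by
  rw [← ext_eq, rev_getD _ _ (by simp [lenFrev]; omega)]
  simp only [lenFrev]
  have : 167 + 1 - 1 - s = 167 - s := by omega
  rw [this, stab s 167 h]

theorem rev_map (m : Nat) : (Frev m).reverse = (List.range (m + 1)).map g := by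
  apply List.ext_getElem
  · simp [lenFrev]
  · intro i h1 h2
    have hi : i < m + 1 := by simpa [lenFrev] using h1
    have : (Frev m).reverse[i] = (Frev m).reverse.getD i 0 := by
      rw [List.getD_eq_getElem _ _ (by simpa [lenFrev] using hi)]
    rw [this, rev_getD _ _ (by simp [lenFrev]; omega)]
    simp only [lenFrev]
    have : m + 1 - 1 - i = m - i := by omega
    rw [this, stab i m (by omega)]
    simp [List.getElem_range]

theorem cands_full (s : Nat) (h : 60 ≤ s) :
    candsG s = coinsN.map (fun p => 1 + g (s - p)) := by
  unfold candsG
  conv_rhs => rw [← List.filterMap_eq_map]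
  apply List.filterMap_congr
  intro p hp
  rcases coins_bounds p hp with ⟨_, hp60⟩
  rw [if_pos (by omega)]
  rfl

theorem foldl_min_map_add (t : List Int) (x : Int) :
    (t.map (fun y => 1 + y)).foldl min (1 + x) = 1 + t.foldl min x := by
  induction t generalizing x with
  | nil => rfl
  | cons a t ih =>
      simp only [List.map_cons, List.foldl_cons]
      rw [← ih]
      congr 1
      omega

set_option maxRecDepth 40000 in
set_option maxHeartbeats 1000000 in
theorem base_per : ∀ k, k < 60 → extTable.getD (k + 108) 0 = extTable.getD (k + 48) 0 + 1 := by decide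

theorem period (s : Nat) (h : 48 ≤ s) : g (s + 60) = g s + 1 := by
  induction s using Nat.strong_induction_on with
  | _ s ih =>
      by_cases hs : s < 108
      · rw [g_ext s (by omega), g_ext (s + 60) (by omega)]
        have := base_per (s - 48) (by omega)
        have h1 : s - 48 + 108 = s + 60 := by omega
        have h2 : s - 48 + 48 = s := by omega
        rwa [h1, h2] at this
      · -- s ≥ 108: both scores see all 43 dart values; shift the candidate list by 1
        have hs1 : s + 60 = (s + 59) + 1 := by omega
        have hs2 : s = (s - 1) + 1 := by omega
        rw [hs1, g_succ, cands_full _ (by omega), ← hs1]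
        rw [hs2, g_succ, cands_full _ (by omega), ← hs2] 
        have hmap : coinsN.map (fun p => 1 + g (s + 60 - p))
            = (coinsN.map (fun p => 1 + g (s - p))).map (fun y => 1 + y) := by
          rw [List.map_map]
          apply List.map_congr_left
          intro p hp
          rcases coins_bounds p hp with ⟨hp1, hp60⟩
          simp only [Function.comp_def]
          have he : s + 60 - p = (s - p) + 60 := by omega
          rw [he, ih (s - p) (by omega) (by omega)]
          omega
        rw [hmap]
        -- peel the head (coinsN = 1 :: …) and use the foldl form of min?
        show (PySem.List.min? (((1 + g (s - 1)) :: ((coinsN.tail).map (fun p => 1 + g (s - p)))).map (fun y => 1 + y)) _).getD 0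
            = (PySem.List.min? ((1 + g (s - 1)) :: ((coinsN.tail).map (fun p => 1 + g (s - p)))) _).getD 0 + 1
        rw [List.map_cons, PySem.List.min?_id_cons, PySem.List.min?_id_cons]
        simp only [Option.getD_some]
        rw [foldl_min_map_add]
        omega

theorem period_mul (j s : Nat) (h : 48 ≤ s) : g (s + 60 * j) = g s + j := by
  induction j with
  | zero => simp
  | succ j ih =>
      have he : s + 60 * (j + 1) = (s + 60 * j) + 60 := by ring
      have h2 : 48 ≤ s + 60 * j := by omega
      rw [he, period _ h2, ih]
      push_cast; ring

theorem map_g_ext (m : Nat) (h : m ≤ 168) : (List.range m).map g = extTable.take m := by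
  apply List.ext_getElem
  · simp [len_ext]; omega
  · intro i h1 h2
    simp only [List.getElem_map, List.getElem_range, List.getElem_take]
    have hi : i < m := by simpa using h1
    rw [g_ext i (by omega), List.getD_eq_getElem _ _ (by rw [len_ext]; omega)]

theorem sum_range_g (m : Nat) (h : m ≤ 168) : ((List.range m).map g).sum = T m := by
  rw [map_g_ext m h]; rfl

set_option maxRecDepth 40000 in
set_option maxHeartbeats 1000000 in
theorem pref_fact : ∀ s, s < 108 → (PySem.List.pyGet? prefTable ((s : Nat) : Int)).getD 0 = T (s + 1) := by decide

set_option maxRecDepth 40000 in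
set_option maxHeartbeats 1000000 in
theorem p_fact : ∀ r, r < 60 → (PySem.List.pyGet? pTable ((r : Nat) : Int)).getD 0 = T (108 + r) := by decide

set_option maxRecDepth 40000 in
set_option maxHeartbeats 1000000 in
theorem w_fact : ∀ r, r < 60 → (PySem.List.pyGet? wTable ((r : Nat) : Int)).getD 0 = T (108 + r) - T (48 + r) := by decide

theorem sum_map_add_const (l : List Nat) (f : Nat → Int) (c : Int) :
    (l.map (fun k => f k + c)).sum = (l.map f).sum + c * l.length := by
  induction l with
  | nil => simp
  | cons x t ih =>
      simp only [List.map_cons, List.sum_cons, List.length_cons, ih]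
      push_cast
      ring

-- sum of one 60-wide window of g, shifted j periods up
theorem window_sum (a j : Nat) (ha : 48 ≤ a) (ha2 : a + 60 ≤ 168) :
    ((List.range 60).map (fun k => g (a + 60 * j + k))).sum
      = (T (a + 60) - T a) + 60 * (j : Int) := by
  have hpt : ∀ k ∈ List.range 60, g (a + 60 * j + k) = g (a + k) + (j : Int) := by
    intro k hk
    have he : a + 60 * j + k = (a + k) + 60 * j := by ring
    rw [he, period_mul j (a + k) (by omega)]
  rw [List.map_congr_left hpt]
  have hsplit : (List.range (a + 60)).map g
      = (List.range a).map g ++ (List.range 60).map (fun k => g (a + k)) := by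
    rw [List.range_add, List.map_append, List.map_map]
    rfl
  have hbase : ((List.range 60).map (fun k => g (a + k))).sum = T (a + 60) - T a := by
    have h1 := sum_range_g (a + 60) (by omega)
    have h2 := sum_range_g a (by omega)
    rw [hsplit, List.sum_append, h2] at h1
    omega
  have hadd := sum_map_add_const (List.range 60) (fun k => g (a + k)) ((j : Int))
  simp only [List.length_range] at hadd
  rw [hadd, hbase]
  push_cast
  ring

-- the closed form agrees with the prefix sum of g, for every period count q and offset r
theorem closed_form (q r : Nat) (hr : r < 60) :
    T (108 + r) + (q : Int) * (T (108 + r) - T (48 + r)) + 30 * (q : Int) * ((q : Int) + 1)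
      = ((List.range (108 + 60 * q + r)).map g).sum := by
  induction q with
  | zero => simp [← sum_range_g (108 + r) (by omega)]
  | succ q ih =>
      have hsplit : 108 + 60 * (q + 1) + r = (108 + 60 * q + r) + 60 := by ring
      rw [hsplit, List.range_add, List.map_append, List.sum_append, ← ih, List.map_map]
      have hw : ((List.range 60).map (g ∘ (fun k => 108 + 60 * q + r + k))).sum
          = (T ((48 + r) + 60) - T (48 + r)) + 60 * ((q : Int) + 1) := by
        have he : ∀ k, 108 + 60 * q + r + k = (48 + r) + 60 * (q + 1) + k := by intro k; ring
        have := window_sum (48 + r) (q + 1) (by omega) (by omega)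
        simp only [Function.comp_def]
        push_cast at this ⊢
        calc ((List.range 60).map (fun k => g (108 + 60 * q + r + k))).sum
            = ((List.range 60).map (fun k => g ((48 + r) + 60 * (q + 1) + k))).sum := by
              apply congrArg; apply List.map_congr_left; intro k _; rw [he k]
          _ = (T (48 + r + 60) - T (48 + r)) + 60 * ((q : Int) + 1) := by
              rw [this]
      rw [hw]
      have h48 : (48 + r) + 60 = 108 + r := by ring
      rw [h48]
      push_cast
      ring

theorem main_sum (N : Nat) : solution_alt (N : Int) = ((List.range (N + 1)).map g).sum := by
  unfold solution_alt
  rw [if_neg (by omega : ¬ ((N : Int) < 0))]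
  by_cases hN : N < 108
  · rw [if_pos (by exact_mod_cast by omega : ((N : Int) < 108))]
    rw [pref_fact N hN, sum_range_g (N + 1) (by omega)]
  · rw [if_neg (by exact_mod_cast by omega : ¬ ((N : Int) < 108))]
    set M := N - 107 with hM
    have hNM : (N : Int) - 107 = ((M : Nat) : Int) := by omega
    have hdm : (PySem.Int.divmod? ((N : Int) - 107) 60).getD (0, 0)
        = (((M / 60 : Nat) : Int), ((M % 60 : Nat) : Int)) := by
      rw [hNM]
      simp [PySem.Int.divmod?]
      constructor
      · exact_mod_cast PySem.Int.floordiv_natCast M 60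
      · exact_mod_cast PySem.Int.mod_natCast M 60
    rw [hdm]
    show (PySem.List.pyGet? pTable ((M % 60 : Nat) : Int)).getD 0
        + ((M / 60 : Nat) : Int) * (PySem.List.pyGet? wTable ((M % 60 : Nat) : Int)).getD 0
        + 30 * ((M / 60 : Nat) : Int) * (((M / 60 : Nat) : Int) + 1)
      = ((List.range (N + 1)).map g).sum
    rw [p_fact (M % 60) (by omega), w_fact (M % 60) (by omega)]
    have hq := closed_form (M / 60) (M % 60) (by omega)
    have hN1 : N + 1 = 108 + 60 * (M / 60) + (M % 60) := by omega
    rw [hN1, ← hq]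

-- ===== VERDICT (by name: the statement is the Claim_ definition above) =====
theorem solution_spec : Claim_equal_solution := by
  intro n _
  unfold Spec_solution
  by_cases h : 0 ≤ n
  · have hn : ((n.toNat : Int)) = n := Int.toNat_of_nonneg h
    have hms := main_sum n.toNat
    rw [hn] at hms
    rw [solution_eq n h, rev_map, hms]
  · have h1 : PySem.List.pyRange 1 (n + 1) 1 = [] := PySem.List.pyRange_one_eq_nil (by omega)

    unfold solution solution_alt
    rw [h1]
    simp [show n < 0 by omega]
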